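-- pv_equiv track=rewrite | github.com/403-Forbidde/feishu-cli-bridge | src/tui_commands/base.py | _format_model_list
-- ===== SOURCE A (Python) =====
-- from typing import Any, Dict, List, Optional, Literal
--
-- def _format_model_list(
--     models: List[Dict[str, Any]], current_model: Optional[str] = None
-- ) -> str:
--     """格式化模型列表为卡片文本
--
--     Args:
--         models: 模型列表，每个模型包含 provider, model, name 等
--         current_model: 当前使用的模型
--
--     Returns:
--         格式化的卡片文本
--     """
--     lines = ["🤖 可用模型", "━━━━━━━━━━━━━━"]
--
--     # 按 provider 分组
--     providers: Dict[str, List[Dict[str, Any]]] = {}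
--     for model in models:
--         provider = model.get("provider", "unknown")
--         if provider not in providers:
--             providers[provider] = []
--         providers[provider].append(model)
--
--     # 限制显示的模型数量，避免消息过长
--     total_models = sum(len(models) for models in providers.values())
--     max_display = 20
--     displayed = 0
--
--     for provider, provider_models in sorted(providers.items()):
--         if displayed >= max_display:
--             break
--
--         lines.append("")
--         lines.append(f"📦 **{provider.upper()}**")
--         lines.append("")
--
--         for i, model in enumerate(provider_models, 1):
--             if displayed >= max_display:
--                 break
--
--             full_id = model.get("full_id", "")
--             name = model.get("name", model.get("model", ""))
--
--             # 当前模型标记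
--             marker = " ★" if full_id == current_model else ""
--
--             # 美化格式：名称加粗，ID用代码格式
--             lines.append(f"**{i}.** {name}{marker}")
--             lines.append(f"   `{full_id}`")
--             lines.append("")
--             displayed += 1
--
--     if total_models > max_display:
--         lines.append(f"*... 还有 {total_models - max_display} 个模型未显示*")
--         lines.append("")
--
--     lines.append("━━━━━━━━━━━━━━")
--     lines.append("💡 **点击回复**并发送模型完整 ID 切换")
--
--     return "\n".join(lines)
-- ===== SOURCE B (Python) =====
-- from typing import Any, Dict, List, Optional
--
--
-- def _format_model_list(
--     models: List[Dict[str, Any]], current_model: Optional[str] = None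
-- ) -> str:
--     """格式化模型列表为卡片文本（两段式：先选出要显示的条目，再渲染）"""
--     # 按 provider 分组
--     groups: Dict[str, List[Dict[str, Any]]] = {}
--     for m in models:
--         groups.setdefault(m.get("provider", "unknown"), []).append(m)
--
--     total_models = sum(len(ms) for ms in groups.values())
--
--     # 展平为 (provider, 组内序号, model) 并一次性截断到前 20 条
--     entries = [
--         (provider, i, model)
--         for provider, provider_models in sorted(groups.items())
--         for i, model in enumerate(provider_models, 1)
--     ][:20]
--
--     lines = ["🤖 可用模型", "━━━━━━━━━━━━━━"]
--     for provider, i, model in entries: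
--         if i == 1:  # 组内序号回到 1 即进入新 provider：输出其标题
--             lines += ["", f"📦 **{provider.upper()}**", ""]
--         full_id = model.get("full_id", "")
--         name = model.get("name", model.get("model", ""))
--         marker = " ★" if full_id == current_model else ""
--         lines += [f"**{i}.** {name}{marker}", f"   `{full_id}`", ""]
--
--     if total_models > 20:
--         lines += [f"*... 还有 {total_models - 20} 个模型未显示*", ""]
--
--     lines += ["━━━━━━━━━━━━━━", "💡 **点击回复**并发送模型完整 ID 切换"]
--     return "\n".join(lines)
-- ===== Notes on version B (the rewrite author's own statement) =====
-- stated objective: alternative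
-- what changed: Replaces A's interleaved nested loops with a running 'displayed' counter and two break statements by a two-pass select-then-format structure: flatten the sorted groups into (provider, index, model) entries, truncate to the first 20 with one slice, then render in a single flat loop that emits a provider header whenever the per-group index restarts at 1.
import Mathlib
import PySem

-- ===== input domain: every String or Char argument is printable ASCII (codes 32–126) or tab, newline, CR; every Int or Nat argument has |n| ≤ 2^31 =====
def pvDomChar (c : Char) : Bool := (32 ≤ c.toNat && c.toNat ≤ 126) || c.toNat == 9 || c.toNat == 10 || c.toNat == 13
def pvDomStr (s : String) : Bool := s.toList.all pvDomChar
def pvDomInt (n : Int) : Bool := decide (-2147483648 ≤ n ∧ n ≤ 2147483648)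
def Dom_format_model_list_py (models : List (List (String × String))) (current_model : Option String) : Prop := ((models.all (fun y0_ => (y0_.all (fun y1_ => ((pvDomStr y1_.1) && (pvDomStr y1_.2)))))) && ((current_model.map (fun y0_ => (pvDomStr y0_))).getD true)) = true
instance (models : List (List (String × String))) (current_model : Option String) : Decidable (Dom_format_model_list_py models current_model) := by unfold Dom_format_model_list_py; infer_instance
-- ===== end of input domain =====

-- B replaces A's nested loops with a running display counter by a select-then-format structure:
-- flatten the sorted groups, truncate to 20 entries with one slice, render in one flat fold (alternative; same cost).


-- ===== PORT A =====
-- inner 'for i, model in enumerate(provider_models, 1)' loop, with its break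
def pvAInner (cm : Option String) : List String → Int → List (Int × List (String × String)) → List String × Int
  | lines, displayed, [] => (lines, displayed)
  | lines, displayed, (i, m) :: rest =>
    if displayed ≥ 20 then (lines, displayed)
    else
      let full_id := (PySem.Dict.mk m).getD "full_id" ""
      let name := (PySem.Dict.mk m).getD "name" ((PySem.Dict.mk m).getD "model" "")
      let marker := if cm = some full_id then " ★" else ""
      pvAInner cm (lines ++ ["**" ++ PySem.Int.toStr i ++ ".** " ++ name ++ marker, "   `" ++ full_id ++ "`", ""]) (displayed + 1) rest

-- outer 'for provider, provider_models in sorted(providers.items())' loop, with its break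
def pvAOuter (cm : Option String) : List String → Int → List (String × List (List (String × String))) → List String
  | lines, _, [] => lines
  | lines, displayed, (p, ms) :: rest =>
    if displayed ≥ 20 then lines
    else
      let lines2 := lines ++ ["", "📦 **" ++ PySem.Str.upper p ++ "**", ""]
      let r := pvAInner cm lines2 displayed (PySem.List.enumerate ms 1)
      pvAOuter cm r.1 r.2 rest

def format_model_list_py (models : List (List (String × String))) (current_model : Option String) : String :=
  let lines0 : List String := ["🤖 可用模型", "━━━━━━━━━━━━━━"]
  let providers := models.foldl (fun d m =>
      let p := (PySem.Dict.mk m).getD "provider" "unknown"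
      let d2 := if d.contains p then d else d.insert p ([] : List (List (String × String)))
      d2.modify p [] (fun l => l ++ [m])) PySem.Dict.empty
  let total := (providers.values.map (fun ms => (ms.length : Int))).sum
  -- dict keys are distinct, so Python's tuple comparison in sorted(providers.items()) is decided by
  -- the provider key alone: ported as a key-sort on the first component (exact here)
  let lines1 := pvAOuter current_model lines0 0 (PySem.List.sorted providers.items (fun pr => pr.1) false)
  let lines2 := if total > 20 then lines1 ++ ["*... 还有 " ++ PySem.Int.toStr (total - 20) ++ " 个模型未显示*", ""] else lines1
  PySem.Str.join "\n" (lines2 ++ ["━━━━━━━━━━━━━━", "💡 **点击回复**并发送模型完整 ID 切换"])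

-- ===== PORT B =====
-- body of B's single rendering loop over the flattened, pre-truncated entries
def pvBRender (cm : Option String) (lines : List String) (e : String × Int × List (String × String)) : List String :=
  let lines2 := if e.2.1 = 1 then lines ++ ["", "📦 **" ++ PySem.Str.upper e.1 ++ "**", ""] else lines
  let full_id := (PySem.Dict.mk e.2.2).getD "full_id" ""
  let name := (PySem.Dict.mk e.2.2).getD "name" ((PySem.Dict.mk e.2.2).getD "model" "")
  let marker := if cm = some full_id then " ★" else ""
  lines2 ++ ["**" ++ PySem.Int.toStr e.2.1 ++ ".** " ++ name ++ marker, "   `" ++ full_id ++ "`", ""]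

def format_model_list_py_alt (models : List (List (String × String))) (current_model : Option String) : String :=
  let groups := models.foldl (fun d m =>
      let p := (PySem.Dict.mk m).getD "provider" "unknown"
      (d.setdefault p []).modify p [] (fun l => l ++ [m])) PySem.Dict.empty
  let total := (groups.values.map (fun ms => (ms.length : Int))).sum
  -- same key-sort note as in port A
  let entries := PySem.List.slice ((PySem.List.sorted groups.items (fun pr => pr.1) false).flatMap
      (fun pr => (PySem.List.enumerate pr.2 1).map (fun im => (pr.1, im.1, im.2)))) none (some 20)
  let lines := entries.foldl (pvBRender current_model) ["🤖 可用模型", "━━━━━━━━━━━━━━"]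
  let lines2 := if total > 20 then lines ++ ["*... 还有 " ++ PySem.Int.toStr (total - 20) ++ " 个模型未显示*", ""] else lines
  PySem.Str.join "\n" (lines2 ++ ["━━━━━━━━━━━━━━", "💡 **点击回复**并发送模型完整 ID 切换"])

-- ===== PRECONDITION & SPEC =====
def Spec_format_model_list_py (models : List (List (String × String))) (current_model : Option String) (out : String) : Prop := out = format_model_list_py_alt models current_model
instance (models : List (List (String × String))) (current_model : Option String) (out : String) : Decidable (Spec_format_model_list_py models current_model out) := by unfold Spec_format_model_list_py; infer_instance

-- ===== CLAIM (what is proved, stated in full; the proofs are below) =====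
def Claim_equal_format_model_list_py : Prop := ∀ (models : List (List (String × String))) (current_model : Option String), Dom_format_model_list_py models current_model → Spec_format_model_list_py models current_model (format_model_list_py models current_model)

-- ===== LEMMAS AND PROOFS =====

-- the provider key of a model
def pvKey (m : List (String × String)) : String := (PySem.Dict.mk m).getD "provider" "unknown"

-- canonical form of the grouping loop shared by both ports
def pvGroup (models : List (List (String × String))) : PySem.Dict String (List (List (String × String))) :=
  models.foldl (fun d m => d.modify (pvKey m) [] (fun l => l ++ [m])) PySem.Dict.empty

lemma pvStepA_eq (d : PySem.Dict String (List (List (String × String)))) (p : String)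
    (m : List (String × String)) :
    (if d.contains p then d else d.insert p []).modify p [] (fun l => l ++ [m])
      = d.modify p [] (fun l => l ++ [m]) := by
  by_cases h : d.contains p = true
  · simp [h]
  · have hnone : d.get? p = none := by
      have := PySem.Dict.contains_eq_isSome_get? d p
      simp [h] at this ⊢
      exact Option.not_isSome_iff_eq_none.mp (by simp [← this])
    simp only [h, Bool.false_eq_true, if_false, PySem.Dict.modify, PySem.Dict.getD,
      PySem.Dict.get?_insert_self, hnone, Option.getD_some, Option.getD_none]
    exact PySem.Dict.insert_insert_self d p [] ([] ++ [m])

lemma pvStepB_eq (d : PySem.Dict String (List (List (String × String)))) (p : String)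
    (m : List (String × String)) :
    (d.setdefault p []).modify p [] (fun l => l ++ [m])
      = (if d.contains p then d else d.insert p []).modify p [] (fun l => l ++ [m]) := by
  by_cases h : d.contains p = true
  · rw [PySem.Dict.setdefault_of_contains d _ h]; simp [h]
  · rw [PySem.Dict.setdefault_of_not_contains d _ (by simpa using h)]
    simp [h]

lemma pvGroupA_eq (models : List (List (String × String))) :
    models.foldl (fun d m =>
      let p := (PySem.Dict.mk m).getD "provider" "unknown"
      let d2 := if d.contains p then d else d.insert p ([] : List (List (String × String)))
      d2.modify p [] (fun l => l ++ [m])) PySem.Dict.empty = pvGroup models := by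
  unfold pvGroup
  congr 1
  funext d m
  exact pvStepA_eq d (pvKey m) m

lemma pvGroupB_eq (models : List (List (String × String))) :
    models.foldl (fun d m =>
      let p := (PySem.Dict.mk m).getD "provider" "unknown"
      (d.setdefault p []).modify p [] (fun l => l ++ [m])) PySem.Dict.empty = pvGroup models := by
  unfold pvGroup
  congr 1
  funext d m
  exact (pvStepB_eq d (pvKey m) m).trans (pvStepA_eq d (pvKey m) m)

lemma pvGroup_keys (models : List (List (String × String))) :
    (pvGroup models).keys = PySem.Set.ofList (models.map pvKey) := by
  unfold pvGroup
  rw [PySem.Dict.keys_foldl_modify_key models pvKey [] (fun _ m => (fun l => l ++ [m])) PySem.Dict.empty]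
  rfl

lemma pvGroup_getD (models : List (List (String × String))) (c : String) :
    (pvGroup models).getD c [] = (models.filter (fun m => pvKey m == c)) := by
  unfold pvGroup
  have h : models.foldl (fun d m => d.modify (pvKey m) [] (fun l => l ++ [m])) PySem.Dict.empty
      = (models.map (fun m => (pvKey m, m))).foldl (fun d q => d.modify q.1 [] (fun l => l ++ [q.2])) PySem.Dict.empty := by
    rw [List.foldl_map]
  rw [h, PySem.Dict.getD_foldl_modify_append]
  simp [List.filter_map, Function.comp_def]

-- every group produced by the grouping loop is nonempty
lemma pvGroup_nonempty (models : List (List (String × String))) :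
    ∀ pr ∈ (pvGroup models).items, pr.2 ≠ [] := by
  intro pr hpr
  have hnd : (pvGroup models).keys.Nodup := by
    unfold pvGroup
    exact PySem.Dict.nodup_keys_foldl_modify_key models pvKey [] (fun _ m => (fun l => l ++ [m])) PySem.Dict.empty (by simp [PySem.Dict.empty, PySem.Dict.keys])
  rw [PySem.Dict.items_eq_map_keys _ hnd []] at hpr
  obtain ⟨k, hk, rfl⟩ := List.mem_map.mp hpr
  have hk' : k ∈ models.map pvKey := by
    rw [pvGroup_keys] at hk
    exact (PySem.Set.mem_ofList _ _).mp hk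
  obtain ⟨m, hm, rfl⟩ := List.mem_map.mp hk'
  simp only [pvGroup_getD]
  intro hnil
  have : m ∈ models.filter (fun m' => pvKey m' == pvKey m) := by
    simp [hm]
  simp [hnil] at this

-- A's inner loop, entered with index j ≥ 2, is B's flat fold on the corresponding entries
lemma pvInner_eq (cm : Option String) (p : String) :
    ∀ (ms : List (List (String × String))) (j : Int) (L : List String) (d : Int), 2 ≤ j →
    pvAInner cm L d (PySem.List.enumerate ms j)
      = ((((PySem.List.enumerate ms j).map (fun im => (p, im.1, im.2))).take (20 - d).toNat).foldl (pvBRender cm) L,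
         d + (min (20 - d).toNat ms.length : Nat)) := by
  intro ms
  induction ms with
  | nil => intro j L d hj; simp [PySem.List.enumerate, pvAInner]
  | cons m ms ih =>
    intro j L d hj
    rw [PySem.List.enumerate_cons]
    by_cases hd : d ≥ 20
    · have h0 : (20 - d).toNat = 0 := by omega
      simp [pvAInner, hd, h0]
    · have h1 : (20 - d).toNat = (20 - (d + 1)).toNat + 1 := by omega
      rw [pvAInner, if_neg hd, ih (j + 1) _ (d + 1) (by omega), h1]
      simp only [List.map_cons, List.take_succ_cons, List.foldl_cons, List.length_cons]
      simp only [Prod.mk.injEq]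
      refine ⟨?_, by push_cast; omega⟩
      · congr 1
        simp only [pvBRender]
        have hj1 : ¬ (j = 1) := by omega
        simp [hj1]

-- A's outer loop is B's flat fold on the truncated flattened entries
lemma pvOuter_eq (cm : Option String) :
    ∀ (gs : List (String × List (List (String × String)))) (L : List String) (d : Int), 0 ≤ d →
    (∀ pr ∈ gs, pr.2 ≠ []) →
    pvAOuter cm L d gs
      = ((gs.flatMap (fun pr => (PySem.List.enumerate pr.2 1).map (fun im => (pr.1, im.1, im.2)))).take (20 - d).toNat).foldl (pvBRender cm) L := by
  intro gs
  induction gs with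
  | nil => intro L d _ _; simp [pvAOuter]
  | cons g rest ih =>
    intro L d hd hne
    obtain ⟨p, ms⟩ := g
    by_cases h20 : d ≥ 20
    · have h0 : (20 - d).toNat = 0 := by omega
      simp [pvAOuter, h20, h0]
    · obtain ⟨m0, ms1, rfl⟩ : ∃ m0 ms1, ms = m0 :: ms1 := by
        rcases ms with _ | ⟨a, b⟩
        · exact absurd rfl (hne (p, []) (by simp))
        · exact ⟨a, b, rfl⟩
      rw [pvAOuter, if_neg h20]
      dsimp only
      -- evaluate the first inner step and close the rest with pvInner_eq
      rw [PySem.List.enumerate_cons, pvAInner, if_neg h20]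
      rw [pvInner_eq cm p ms1 (1 + 1) _ (d + 1) (by omega)]
      rw [List.flatMap_cons, List.take_append, List.foldl_append]
      rw [PySem.List.enumerate_cons, List.map_cons]
      have h1 : (20 - d).toNat = (20 - (d + 1)).toNat + 1 := by omega
      rw [h1, List.take_succ_cons, List.foldl_cons]
      rw [ih _ _ (by positivity) (fun pr hpr => hne pr (by simp [hpr]))]
      simp only [List.length_cons, List.length_map, PySem.List.length_enumerate]
      congr 2
      all_goals omega

-- ===== VERDICT (by name: the statement is the Claim_ definition above) =====
theorem format_model_list_py_spec : Claim_equal_format_model_list_py := by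
  intro models cm _
  unfold Spec_format_model_list_py format_model_list_py format_model_list_py_alt
  rw [pvGroupA_eq, pvGroupB_eq]
  dsimp only
  rw [PySem.List.slice_to _ (by norm_num)]
  have hne : ∀ pr ∈ PySem.List.sorted (pvGroup models).items (fun pr => pr.1) false, pr.2 ≠ [] := by
    intro pr hpr
    exact pvGroup_nonempty models pr ((PySem.List.mem_sorted _ _ _ _).mp hpr)
  rw [pvOuter_eq cm _ _ 0 le_rfl hne]
  norm_num
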